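-- pv_equiv track=rewrite | github.com/Nostoi/rom24-quickmud-python | mud/commands/info.py | _chunk_commands
-- ===== SOURCE A (Python) =====
-- _COLUMNS_PER_ROW = 6
--
-- _COLUMN_WIDTH = 12
--
-- def _chunk_commands(names: list[str]) -> list[str]:
--     if not names:
--         return []
--     rows: list[str] = []
--     current: list[str] = []
--     for index, name in enumerate(names, start=1):
--         current.append(f"{name:<{_COLUMN_WIDTH}}")
--         if index % _COLUMNS_PER_ROW == 0:
--             rows.append("".join(current).rstrip())
--             current = []
--     if current:
--         rows.append("".join(current).rstrip())
--     return rows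
-- ===== SOURCE B (Python) =====
-- _COLUMNS_PER_ROW = 6
--
-- _COLUMN_WIDTH = 12
--
-- def _chunk_commands(names: list[str]) -> list[str]:
--     return [
--         "".join(f"{name:<{_COLUMN_WIDTH}}" for name in names[i:i + _COLUMNS_PER_ROW]).rstrip()
--         for i in range(0, len(names), _COLUMNS_PER_ROW)
--     ]
-- ===== Notes on version B (the rewrite author's own statement) =====
-- stated objective: idiomatic
-- what changed: Replaces the enumerate/modulo counter with its 'current' accumulator and trailing flush by a single comprehension over slice-cut chunks (range stepping by 6, join+rstrip per chunk).
import Mathlib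
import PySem

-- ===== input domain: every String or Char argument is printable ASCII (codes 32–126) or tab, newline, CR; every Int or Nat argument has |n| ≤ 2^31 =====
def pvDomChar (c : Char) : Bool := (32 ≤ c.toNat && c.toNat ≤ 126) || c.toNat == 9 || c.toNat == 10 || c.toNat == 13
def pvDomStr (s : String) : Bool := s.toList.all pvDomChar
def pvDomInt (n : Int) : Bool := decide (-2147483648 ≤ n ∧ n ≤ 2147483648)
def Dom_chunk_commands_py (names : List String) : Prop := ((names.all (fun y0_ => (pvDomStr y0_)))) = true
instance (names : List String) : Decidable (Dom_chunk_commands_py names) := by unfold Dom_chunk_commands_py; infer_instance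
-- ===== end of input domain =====

-- B replaces A's enumerate/modulo counter, 'current' accumulator and trailing flush by a
-- comprehension over slice-cut chunks of 6; same values, no speed claim (objective: idiomatic).

-- f"{name:<12}": left-justify to width 12 with spaces (hand port, exact on all strings:
-- shorter strings get 12 - len trailing spaces, longer ones are unchanged)
def pvPad (s : String) : String :=
  String.ofList (s.toList ++ List.replicate (12 - s.toList.length) ' ')

-- ===== PORT A =====
def chunk_commands_py (names : List String) : List String :=
  if names = [] then []
  else
    let st :=
      (PySem.List.enumerate names 1).foldl
        (fun (st : List String × List String) (p : Int × String) =>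
          let current := st.2 ++ [pvPad p.2]
          if PySem.Int.mod p.1 6 == 0 then
            (st.1 ++ [PySem.Str.rstrip (PySem.Str.join "" current)], [])
          else (st.1, current))
        ([], [])
    if st.2 ≠ [] then st.1 ++ [PySem.Str.rstrip (PySem.Str.join "" st.2)] else st.1

-- ===== PORT B =====
def chunk_commands_py_alt (names : List String) : List String :=
  (PySem.List.pyRange 0 (names.length : Int) 6).map (fun i =>
    PySem.Str.rstrip (PySem.Str.join ""
      ((PySem.List.slice names (some i) (some (i + 6))).map pvPad)))

-- ===== PRECONDITION & SPEC =====
def Spec_chunk_commands_py (names : List String) (out : List String) : Prop := out = chunk_commands_py_alt names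
instance (names : List String) (out : List String) : Decidable (Spec_chunk_commands_py names out) := by unfold Spec_chunk_commands_py; infer_instance

-- ===== CLAIM (what is proved, stated in full; the proofs are below) =====
def Claim_equal_chunk_commands_py : Prop := ∀ (names : List String), Dom_chunk_commands_py names → Spec_chunk_commands_py names (chunk_commands_py names)

-- ===== LEMMAS AND PROOFS =====

-- one output row built from an (unpadded) chunk of at most 6 names
def pvRow (c : List String) : String :=
  PySem.Str.rstrip (PySem.Str.join "" (c.map pvPad))

-- reference: the row list, chunk by chunk
def pvChunks : List String → List String
  | [] => []
  | x :: xs => pvRow ((x :: xs).take 6) :: pvChunks ((x :: xs).drop 6)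
termination_by l => l.length
decreasing_by simp

-- A's loop body and final flush, named for the lemmas
def pvStepA (st : List String × List String) (p : Int × String) : List String × List String :=
  let current := st.2 ++ [pvPad p.2]
  if PySem.Int.mod p.1 6 == 0 then
    (st.1 ++ [PySem.Str.rstrip (PySem.Str.join "" current)], [])
  else (st.1, current)

def pvPostA (st : List String × List String) : List String :=
  if st.2 ≠ [] then st.1 ++ [PySem.Str.rstrip (PySem.Str.join "" st.2)] else st.1

lemma pvNoFlush (c : List String) (s : Int) (rows cur : List String)
    (h : ∀ k : Nat, k < c.length → (s + k) % 6 ≠ 0) :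
    List.foldl pvStepA (rows, cur) (PySem.List.enumerate c s) = (rows, cur ++ c.map pvPad) := by
  induction c generalizing s cur with
  | nil => simp [PySem.List.enumerate_nil]
  | cons a c ih =>
    rw [PySem.List.enumerate_cons]
    have h0 : (PySem.Int.mod s 6 == 0) = false := by
      rw [PySem.Int.mod_eq_emod_of_pos (by norm_num)]
      have := h 0 (by simp)
      simpa using this
    simp only [List.foldl_cons, pvStepA, h0, Bool.false_eq_true, if_false]
    rw [ih (s + 1) (cur ++ [pvPad a]) (fun k hk => by
      have := h (k + 1) (by simpa using Nat.succ_lt_succ hk)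
      push_cast at this ⊢; omega)]
    simp

lemma pvFullChunk (c : List String) (hc : c.length = 6) (s : Int) (hs : s % 6 = 1)
    (rows : List String) :
    List.foldl pvStepA (rows, []) (PySem.List.enumerate c s) = (rows ++ [pvRow c], []) := by
  obtain ⟨a1, a2, a3, a4, a5, a6, rfl⟩ :
      ∃ a1 a2 a3 a4 a5 a6, c = [a1, a2, a3, a4, a5, a6] := by
    rcases c with _ | ⟨a1, c⟩; · simp at hc
    rcases c with _ | ⟨a2, c⟩; · simp at hc
    rcases c with _ | ⟨a3, c⟩; · simp at hc
    rcases c with _ | ⟨a4, c⟩; · simp at hc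
    rcases c with _ | ⟨a5, c⟩; · simp at hc
    rcases c with _ | ⟨a6, c⟩; · simp at hc
    rcases c with _ | ⟨a7, c⟩
    · exact ⟨a1, a2, a3, a4, a5, a6, rfl⟩
    · simp at hc
  simp only [PySem.List.enumerate_cons, PySem.List.enumerate_nil, List.foldl_cons,
    List.foldl_nil, pvStepA, PySem.Int.mod_eq_emod_of_pos (by norm_num : (0:Int) < 6)]
  have h1 : (s % 6 == 0) = false := by rw [beq_eq_false_iff_ne]; omega
  have h2 : ((s + 1) % 6 == 0) = false := by rw [beq_eq_false_iff_ne]; omega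
  have h3 : ((s + 1 + 1) % 6 == 0) = false := by rw [beq_eq_false_iff_ne]; omega
  have h4 : ((s + 1 + 1 + 1) % 6 == 0) = false := by rw [beq_eq_false_iff_ne]; omega
  have h5 : ((s + 1 + 1 + 1 + 1) % 6 == 0) = false := by rw [beq_eq_false_iff_ne]; omega
  have h6 : ((s + 1 + 1 + 1 + 1 + 1) % 6 == 0) = true := by rw [beq_iff_eq]; omega
  simp [h1, h2, h3, h4, h5, h6, pvRow]

lemma pvLoopMain (names : List String) : ∀ (rows : List String) (s : Int), s % 6 = 1 →
    pvPostA (List.foldl pvStepA (rows, []) (PySem.List.enumerate names s)) =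
      rows ++ pvChunks names := by
  induction names using pvChunks.induct with
  | case1 => intro rows s _; simp [PySem.List.enumerate_nil, pvPostA, pvChunks]
  | case2 x xs ih =>
    intro rows s hs
    by_cases h6 : 6 ≤ (x :: xs).length
    · have h6' : 5 ≤ xs.length := by simp at h6; omega
      have hlen : ((x :: xs).take 6).length = 6 := by
        rw [List.length_take]; simp; omega
      rw [show PySem.List.enumerate (x :: xs) s =
            PySem.List.enumerate ((x :: xs).take 6 ++ (x :: xs).drop 6) s from by
          rw [List.take_append_drop]]
      rw [PySem.List.enumerate_append, List.foldl_append,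
        pvFullChunk _ hlen s hs rows, hlen]
      rw [show s + ((6 : Nat) : Int) = s + 6 from by push_cast; ring]
      rw [ih (rows ++ [pvRow ((x :: xs).take 6)]) (s + 6) (by omega)]
      rw [pvChunks]
      simp
    · have hne : (x :: xs).map pvPad ≠ [] := by simp
      rw [pvNoFlush _ s rows [] (fun k hk => by
        simp at h6 hk; omega)]
      simp only [pvPostA, List.nil_append]
      rw [if_pos (by simp)]
      rw [pvChunks]
      have ht : (x :: xs).take 6 = x :: xs := List.take_of_length_le (by omega)
      have hd : (x :: xs).drop 6 = [] := List.drop_of_length_le (by omega)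
      rw [ht, hd, pvChunks]
      simp [pvRow]

lemma pvRangeChunks (l : List String) :
    (List.range (if (0:Int) < (l.length : Int) then
        (((l.length : Int) - 0 + 6 - 1) / 6).toNat else 0)).map
      (fun k => pvRow ((l.drop (6 * k)).take 6)) = pvChunks l := by
  induction l using pvChunks.induct with
  | case1 => simp [pvChunks]
  | case2 x xs ih =>
    have hpos : (0:Int) < ((x :: xs).length : Int) := by simp
    rw [if_pos hpos]
    have hm : ((((x :: xs).length : Int) - 0 + 6 - 1) / 6).toNat =
        (if (0:Int) < (((x :: xs).drop 6).length : Int) then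
          (((((x :: xs).drop 6).length : Int) - 0 + 6 - 1) / 6).toNat else 0) + 1 := by
      simp only [List.length_cons, List.length_drop]
      split_ifs with h <;> (push_cast at *; omega)
    rw [hm, List.range_succ_eq_map, List.map_cons, List.map_map]
    rw [pvChunks]
    simp only [List.cons_eq_cons]
    constructor
    · norm_num
    · rw [← ih]
      apply List.map_congr_left
      intro k _
      simp only [Function.comp_apply]
      rw [List.drop_drop, show 6 + 6 * k = 6 * k.succ from by omega]

lemma pvAltEq (names : List String) : chunk_commands_py_alt names = pvChunks names := by
  unfold chunk_commands_py_alt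
  rw [PySem.List.pyRange_of_pos _ _ (by norm_num), List.map_map, ← pvRangeChunks names]
  apply List.map_congr_left
  intro k _
  simp only [Function.comp_apply, zero_add]
  have h1 : (6 : Int) * (k : Int) = ((6 * k : Nat) : Int) := by push_cast; ring
  have h2 : (6 : Int) * (k : Int) + 6 = ((6 * k : Nat) : Int) + ((6 : Nat) : Int) := by
    push_cast; ring
  rw [h1] at h2 ⊢
  rw [h2, PySem.List.slice_natCast_add]
  simp only [pvRow]

-- ===== VERDICT (by name: the statement is the Claim_ definition above) =====
theorem chunk_commands_py_spec : Claim_equal_chunk_commands_py := by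
  intro names _
  unfold Spec_chunk_commands_py chunk_commands_py
  rw [pvAltEq]
  by_cases h : names = []
  · subst h; simp [pvChunks]
  · rw [if_neg h]
    have hstep : (fun (st : List String × List String) (p : Int × String) =>
        let current := st.2 ++ [pvPad p.2]
        if PySem.Int.mod p.1 6 == 0 then
          (st.1 ++ [PySem.Str.rstrip (PySem.Str.join "" current)], [])
        else (st.1, current)) = pvStepA := rfl
    rw [hstep]
    have := pvLoopMain names [] 1 (by norm_num)
    simpa [pvPostA] using this
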